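-- pv_equiv track=rewrite | github.com/Dieren-F/Lab4-Informatics | jsonparsewithre.py | superstrip
-- ===== SOURCE A (Python) =====
-- def superstrip(lis):
--     lis1 = ""
--     cnt = 0
--     for i in lis:
--         if i=="\"":
--             cnt += 1
--         if i not in [" ", "\n", "\t"] or (cnt%2)==1:
--             lis1 += i
--     return lis1
-- ===== SOURCE B (Python) =====
-- def superstrip(lis):
--     ws = {' ', '\n', '\t'}
--     parts = lis.split('"')
--     return '"'.join(part if i % 2 == 1 else ''.join(c for c in part if c not in ws)
--                     for i, part in enumerate(parts))
-- ===== Notes on version B (the rewrite author's own statement) =====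
-- stated objective: idiomatic
-- what changed: Replaces the character-by-character quote-parity counter with splitting on the quote character: even-indexed segments (outside quotes) are whitespace-filtered, odd-indexed segments kept verbatim, then rejoined.
import Mathlib
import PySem

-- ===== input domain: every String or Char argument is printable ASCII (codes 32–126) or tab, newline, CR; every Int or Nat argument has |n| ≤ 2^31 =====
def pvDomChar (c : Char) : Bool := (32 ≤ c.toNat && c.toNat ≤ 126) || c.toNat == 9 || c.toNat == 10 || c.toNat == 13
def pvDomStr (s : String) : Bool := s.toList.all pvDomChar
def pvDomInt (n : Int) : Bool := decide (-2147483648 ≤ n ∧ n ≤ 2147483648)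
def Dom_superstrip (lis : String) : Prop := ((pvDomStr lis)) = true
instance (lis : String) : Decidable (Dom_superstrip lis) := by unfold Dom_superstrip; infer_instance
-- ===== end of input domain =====

-- B replaces A's character-by-character quote-parity counter with split-on-'"' /
-- filter-even-segments / rejoin; equivalence proved for all strings (Dom unused).


-- ===== PORT A =====
-- for i in lis: if i == '"': cnt += 1; if i not in [' ','\n','\t'] or cnt % 2 == 1: lis1 += i
def superstrip (lis : String) : String :=
  let r := lis.toList.foldl
    (fun (st : Nat × List Char) i =>
      let cnt := if i = '"' then st.1 + 1 else st.1
      let lis1 := if ¬ (i = ' ' ∨ i = '\n' ∨ i = '\t') ∨ cnt % 2 = 1 then st.2 ++ [i] else st.2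
      (cnt, lis1))
    (0, [])
  String.mk r.2

-- ===== PORT B =====
-- parts = lis.split('"'); '"'.join(part if i % 2 == 1 else filtered part for i, part in enumerate(parts))
def superstrip_alt (lis : String) : String :=
  let parts := lis.toList.splitOn '"'
  String.mk (List.intercalate ['"']
    (parts.mapIdx (fun i part =>
      if i % 2 = 1 then part
      else part.filter (fun c => !(c = ' ' || c = '\n' || c = '\t')))))

-- ===== PRECONDITION & SPEC =====
def Spec_superstrip (lis : String) (out : String) : Prop := out = superstrip_alt lis
instance (lis : String) (out : String) : Decidable (Spec_superstrip lis out) := by unfold Spec_superstrip; infer_instance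

-- ===== CLAIM (what is proved, stated in full; the proofs are below) =====
def Claim_equal_superstrip : Prop := ∀ (lis : String), Dom_superstrip lis → Spec_superstrip lis (superstrip lis)

-- ===== LEMMAS AND PROOFS =====

-- proof-only helpers
def pvWs (c : Char) : Bool := c = ' ' || c = '\n' || c = '\t'

-- A's loop, as a parity-indexed recursion (q = "cnt is odd")
def pvG : List Char → Bool → List Char
  | [], _ => []
  | c :: t, q =>
    let q' := if c = '"' then !q else q
    if !(pvWs c) || q' then c :: pvG t q' else pvG t q'

-- B's join-of-processed-segments, as a parity-indexed recursion over the parts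
def pvProc : Bool → List (List Char) → List Char
  | _, [] => []
  | q, [p] => if q then p else p.filter (fun c => !pvWs c)
  | q, p :: r :: rest =>
    (if q then p else p.filter (fun c => !pvWs c)) ++ '"' :: pvProc (!q) (r :: rest)

theorem pvPar (n : Nat) : (decide ((n + 1) % 2 = 1)) = !(decide (n % 2 = 1)) := by
  rcases Nat.mod_two_eq_zero_or_one n with h | h <;> simp [Nat.add_mod, h]

theorem pvFoldA (cs : List Char) (cnt : Nat) (acc : List Char) :
    (cs.foldl (fun (st : Nat × List Char) i =>
      let cnt := if i = '"' then st.1 + 1 else st.1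
      let lis1 := if ¬ (i = ' ' ∨ i = '\n' ∨ i = '\t') ∨ cnt % 2 = 1 then st.2 ++ [i] else st.2
      (cnt, lis1)) (cnt, acc)).2 = acc ++ pvG cs (decide (cnt % 2 = 1)) := by
  induction cs generalizing cnt acc with
  | nil => simp [pvG]
  | cons c t ih =>
    simp only [List.foldl_cons, pvG]
    by_cases hq : c = '"'
    · subst hq
      rw [ih]
      simp [pvPar, pvWs]
    · rw [if_neg hq, ih]
      by_cases hws : c = ' ' ∨ c = '\n' ∨ c = '\t'
      · have hwsb : pvWs c = true := by rcases hws with h | h | h <;> simp [pvWs, h]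
        by_cases hp : cnt % 2 = 1
        · rw [if_pos (Or.inr hp)]
          simp [hq, hwsb, hp]
        · rw [if_neg (by tauto)]
          simp [hq, hwsb, hp]
      · have hwsb : pvWs c = false := by
          simp only [pvWs, Bool.or_eq_false_iff, decide_eq_false_iff_not]
          tauto
        rw [if_pos (Or.inl hws)]
        simp [hq, hwsb]

theorem pvInterCons (a b : List Char) (l : List (List Char)) :
    List.intercalate ['"'] (a :: b :: l) = a ++ '"' :: List.intercalate ['"'] (b :: l) := by
  simp [List.intercalate, List.intersperse]

theorem pvMapIdxJoin (parts : List (List Char)) (k : Nat) :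
    List.intercalate ['"']
      (parts.mapIdx (fun i part =>
        if (i + k) % 2 = 1 then part
        else part.filter (fun c => !(c = ' ' || c = '\n' || c = '\t')))) =
    pvProc (decide (k % 2 = 1)) parts := by
  have hfun : (fun (c : Char) => !(c = ' ' || c = '\n' || c = '\t')) = (fun c => !pvWs c) := by
    funext c; simp [pvWs]
  rw [hfun]
  induction parts generalizing k with
  | nil => simp [pvProc, List.intercalate]
  | cons p rest ih =>
    cases rest with
    | nil =>
      by_cases hk : k % 2 = 1 <;> simp [pvProc, List.intercalate, hk]
    | cons r rest' =>
      rw [List.mapIdx_cons]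
      have harg : (fun (i : Nat) (part : List Char) =>
          if (i + 1 + k) % 2 = 1 then part else part.filter (fun c => !pvWs c)) =
          (fun (i : Nat) (part : List Char) =>
          if (i + (k + 1)) % 2 = 1 then part else part.filter (fun c => !pvWs c)) := by
        funext i part
        rw [Nat.add_assoc, Nat.add_comm 1 k]
      rw [harg]
      have hih := ih (k + 1)
      rw [pvPar] at hih
      rw [List.mapIdx_cons] at hih ⊢
      simp only [Nat.zero_add] at hih
      by_cases hk : k % 2 = 1 <;>
        · rw [pvInterCons]
          simp only [hk, decide_true, decide_false] at hih
          simp [pvProc, hk, hih]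

theorem pvGProc (cs : List Char) (q : Bool) : pvG cs q = pvProc q (cs.splitOn '"') := by
  induction cs generalizing q with
  | nil => simp [pvG, List.splitOn, List.splitOnP_nil, pvProc, pvWs]
  | cons c t ih =>
    have hne := List.splitOnP_ne_nil (p := (· == '"')) t
    obtain ⟨p, rest, hpr⟩ : ∃ p rest, t.splitOn '"' = p :: rest := by
      cases h : t.splitOn '"' with
      | nil => exact absurd h hne
      | cons p rest => exact ⟨p, rest, rfl⟩
    by_cases hq : c = '"'
    · subst hq
      have hsp : (('"' : Char) :: t).splitOn '"' = [] :: t.splitOn '"' := by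
        simp [List.splitOn, List.splitOnP_cons]
      rw [hsp, hpr]
      have hproc : pvProc q ([] :: p :: rest) = '"' :: pvProc (!q) (p :: rest) := by
        cases q <;> simp [pvProc]
      rw [hproc, ← hpr, ← ih]
      simp [pvG, pvWs]
    · have hsplit : (c :: t).splitOn '"' = (c :: p) :: rest := by
        simp only [List.splitOn, List.splitOnP_cons]
        rw [if_neg (by simp [hq])]
        show (t.splitOnP (· == '"')).modifyHead (c :: ·) = _
        rw [show t.splitOnP (· == '"') = p :: rest from hpr]
        rfl
      rw [hsplit]
      simp only [pvG, if_neg hq, ih, hpr]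
      by_cases hws : pvWs c = true
      · cases q with
        | true =>
          cases rest <;> simp [pvProc, hws]
        | false =>
          cases rest <;> simp [pvProc, hws]
      · have hws' : pvWs c = false := by simpa using hws
        cases q <;> cases rest <;> simp [pvProc, hws']

-- ===== VERDICT (by name: the statement is the Claim_ definition above) =====
theorem superstrip_spec : Claim_equal_superstrip := by
  intro lis _
  show superstrip lis = superstrip_alt lis
  unfold superstrip superstrip_alt
  simp only []
  rw [pvFoldA lis.toList 0 []]
  have h := pvMapIdxJoin (lis.toList.splitOn '"') 0
  simp only [Nat.add_zero] at h
  rw [h, pvGProc]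
  rfl
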